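-- pv_equiv track=rewrite | github.com/pypi-data/pypi-mirror-271 | packages/raugraf/raugraf-0.0.5-py3-none-any.whl/raugraf/noderadius.py | noderadius
-- ===== SOURCE A (Python) =====
-- def noderadius(G, source_node, num_steps, nodes_seen=None):
--     if nodes_seen is None:
--         nodes_seen = set()
--     if num_steps>1:
--         try:
--             neighbors = G[source_node]
--         except KeyError:
--             return nodes_seen
--         for nbr in neighbors:
--             if nbr not in nodes_seen:
--                 nodes_seen.add(nbr)
--                 noderadius(G, nbr, num_steps-1, nodes_seen)
--     return nodes_seen
-- ===== SOURCE B (Python) =====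
-- def noderadius(G, source_node, num_steps, nodes_seen=None):
--     # Iterative DFS with an explicit stack of resumable (iterator, steps) frames.
--     # Mutates nodes_seen in place, like the original.
--     if nodes_seen is None:
--         nodes_seen = set()
--     if num_steps > 1 and source_node in G:
--         _MISS = object()
--         stack = [(iter(G[source_node]), num_steps)]
--         while stack:
--             it, steps = stack[-1]
--             nbr = next(it, _MISS)
--             if nbr is _MISS:
--                 stack.pop()
--                 continue
--             if nbr not in nodes_seen:
--                 nodes_seen.add(nbr)
--                 if steps - 1 > 1 and nbr in G:
--                     stack.append((iter(G[nbr]), steps - 1))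
--     return nodes_seen
-- ===== Notes on version B (the rewrite author's own statement) =====
-- stated objective: alternative
-- what changed: Replaces the depth-limited pre-order recursion by an explicit while loop over a stack of resumable (neighbor-iterator, remaining-steps) frames, advancing one neighbor at a time; same cost, no recursion.
import Mathlib
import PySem

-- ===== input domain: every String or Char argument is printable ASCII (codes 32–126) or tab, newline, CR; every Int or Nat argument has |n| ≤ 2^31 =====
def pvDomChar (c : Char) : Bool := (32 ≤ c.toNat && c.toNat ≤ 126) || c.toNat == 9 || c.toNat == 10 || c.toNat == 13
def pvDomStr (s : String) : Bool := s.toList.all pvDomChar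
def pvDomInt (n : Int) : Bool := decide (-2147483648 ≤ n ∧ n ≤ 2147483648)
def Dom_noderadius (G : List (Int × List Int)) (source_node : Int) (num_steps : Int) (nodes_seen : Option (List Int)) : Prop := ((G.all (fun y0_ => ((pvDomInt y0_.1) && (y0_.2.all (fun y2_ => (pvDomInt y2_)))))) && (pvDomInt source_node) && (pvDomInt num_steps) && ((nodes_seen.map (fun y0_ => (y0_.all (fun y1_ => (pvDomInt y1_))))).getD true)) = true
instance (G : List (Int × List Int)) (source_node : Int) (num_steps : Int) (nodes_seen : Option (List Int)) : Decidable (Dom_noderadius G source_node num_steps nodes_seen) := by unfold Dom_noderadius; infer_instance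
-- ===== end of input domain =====

-- B rewrites the depth-limited pre-order recursion as an explicit stack of resumable
-- (neighbor-list, remaining-steps) frames advanced one neighbor at a time (objective:
-- alternative, same cost). Both Pythons mutate nodes_seen in place identically; the
-- theorems below are about the returned set (as its insertion-order element list).

-- ===== PORT A =====
-- A's recursion, with the shared mutable set threaded through; the for-loop is the foldl.
def noderadiusAuxA (G : List (Int × List Int)) (source_node : Int) (num_steps : Int) (seen : PySem.Set Int) : PySem.Set Int :=
  if _h : num_steps > 1 then
    match (PySem.Dict.mk G).get? source_node with
    | none => seen
    | some neighbors =>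
        neighbors.foldl
          (fun s nbr =>
            if nbr ∈ s then s
            else noderadiusAuxA G nbr (num_steps - 1) (PySem.Set.add s nbr)) seen
  else seen
termination_by num_steps.toNat
decreasing_by omega

def noderadius (G : List (Int × List Int)) (source_node : Int) (num_steps : Int) (nodes_seen : Option (List Int)) : List Int :=
  let seen : PySem.Set Int := match nodes_seen with | none => PySem.Set.empty | some s => s
  noderadiusAuxA G source_node num_steps seen

-- ===== PORT B =====
-- weight of one stack frame, for termination of the while loop only
def nrWeight (b : Nat) (fr : List Int × Int) : Nat := (fr.1.length + 1) * b ^ fr.2.toNat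
-- bound on adjacency-list lengths of G, for termination only
def nrBound (G : List (Int × List Int)) : Nat := (G.map (fun p => p.2.length)).foldr max 0 + 2

theorem nrGet_mem {G : List (Int × List Int)} {k : Int} {v : List Int}
    (h : (PySem.Dict.mk G).get? k = some v) : v ∈ G.map Prod.snd := by
  induction G with
  | nil => simp [PySem.Dict.get?] at h
  | cons p rest ih =>
      rw [show (p :: rest) = ((p.1, p.2) :: rest) from rfl, PySem.Dict.get?_mk_cons] at h
      by_cases hk : p.1 == k
      · simp [hk] at h; simp [← h]
      · simp [hk] at h; simp [ih h]

theorem nrBound_le {G : List (Int × List Int)} {v : List Int}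
    (h : v ∈ G.map Prod.snd) : v.length + 2 ≤ nrBound G := by
  unfold nrBound
  induction G with
  | nil => simp at h
  | cons p rest ih =>
      simp only [List.map_cons, List.mem_cons] at h
      simp only [List.map_cons, List.foldr_cons]
      rcases h with h | h
      · subst h; omega
      · have := ih h; omega

-- the while loop: top frame is advanced by one neighbor; exhausted frames are popped
def nrLoop (G : List (Int × List Int)) (stack : List (List Int × Int)) (seen : PySem.Set Int) : PySem.Set Int :=
  match stack with
  | [] => seen
  | ([], _) :: rest => nrLoop G rest seen
  | (nbr :: more, steps) :: rest =>
      if nbr ∈ seen then nrLoop G ((more, steps) :: rest) seen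
      else
        let seen' := PySem.Set.add seen nbr
        if _h2 : steps - 1 > 1 then
          match hg : (PySem.Dict.mk G).get? nbr with
          | none => nrLoop G ((more, steps) :: rest) seen'
          | some nb2 => nrLoop G ((nb2, steps - 1) :: (more, steps) :: rest) seen'
        else nrLoop G ((more, steps) :: rest) seen'
termination_by (stack.map (nrWeight (nrBound G))).sum
decreasing_by
  · -- pop an exhausted frame
    simp only [List.map_cons, List.sum_cons, nrWeight]
    have hb : 0 < nrBound G := by unfold nrBound; omega
    apply Nat.lt_add_of_pos_left
    positivity
  · -- nbr already seen: top frame shrinks by one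
    simp only [List.map_cons, List.sum_cons, nrWeight, List.length_cons]
    have hb : 0 < nrBound G ^ steps.toNat := Nat.pow_pos (by unfold nrBound; omega)
    have key : (more.length + 1) * nrBound G ^ steps.toNat
        < (more.length + 1 + 1) * nrBound G ^ steps.toNat :=
      (Nat.mul_lt_mul_right hb).mpr (by omega)
    omega
  · -- new node, no neighbors in G: top frame shrinks
    simp only [List.map_cons, List.sum_cons, nrWeight, List.length_cons]
    have hb : 0 < nrBound G ^ steps.toNat := Nat.pow_pos (by unfold nrBound; omega)
    have key : (more.length + 1) * nrBound G ^ steps.toNat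
        < (more.length + 1 + 1) * nrBound G ^ steps.toNat :=
      (Nat.mul_lt_mul_right hb).mpr (by omega)
    omega
  · -- push a child frame: its weight is below one neighbor's weight
    simp only [List.map_cons, List.sum_cons, nrWeight, List.length_cons]
    have hlen : nb2.length + 2 ≤ nrBound G := nrBound_le (nrGet_mem hg)
    have hst : steps.toNat = (steps - 1).toNat + 1 := by omega
    have hp : 0 < nrBound G ^ (steps - 1).toNat := Nat.pow_pos (by unfold nrBound; omega)
    have h1 : (nb2.length + 1) * nrBound G ^ (steps - 1).toNat < nrBound G ^ steps.toNat := by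
      calc (nb2.length + 1) * nrBound G ^ (steps - 1).toNat
          < nrBound G * nrBound G ^ (steps - 1).toNat :=
            (Nat.mul_lt_mul_right hp).mpr (by omega)
        _ = nrBound G ^ steps.toNat := by rw [hst, pow_succ]; ring
    have e4 : (more.length + 1 + 1) * nrBound G ^ steps.toNat
        = (more.length + 1) * nrBound G ^ steps.toNat + nrBound G ^ steps.toNat := by ring
    omega
  · -- child depth exhausted: top frame shrinks
    simp only [List.map_cons, List.sum_cons, nrWeight, List.length_cons]
    have hb : 0 < nrBound G ^ steps.toNat := Nat.pow_pos (by unfold nrBound; omega)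
    have key : (more.length + 1) * nrBound G ^ steps.toNat
        < (more.length + 1 + 1) * nrBound G ^ steps.toNat :=
      (Nat.mul_lt_mul_right hb).mpr (by omega)
    omega

def noderadius_alt (G : List (Int × List Int)) (source_node : Int) (num_steps : Int) (nodes_seen : Option (List Int)) : List Int :=
  let seen : PySem.Set Int := match nodes_seen with | none => PySem.Set.empty | some s => s
  if num_steps > 1 then
    match (PySem.Dict.mk G).get? source_node with
    | none => seen
    | some neighbors => nrLoop G [(neighbors, num_steps)] seen
  else seen

-- ===== PRECONDITION & SPEC =====
def Spec_noderadius (G : List (Int × List Int)) (source_node : Int) (num_steps : Int) (nodes_seen : Option (List Int)) (out : List Int) : Prop := out = noderadius_alt G source_node num_steps nodes_seen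
instance (G : List (Int × List Int)) (source_node : Int) (num_steps : Int) (nodes_seen : Option (List Int)) (out : List Int) : Decidable (Spec_noderadius G source_node num_steps nodes_seen out) := by unfold Spec_noderadius; infer_instance

-- ===== CLAIM (what is proved, stated in full; the proofs are below) =====
def Claim_equal_noderadius : Prop := ∀ (G : List (Int × List Int)) (source_node : Int) (num_steps : Int) (nodes_seen : Option (List Int)), Dom_noderadius G source_node num_steps nodes_seen → Spec_noderadius G source_node num_steps nodes_seen (noderadius G source_node num_steps nodes_seen)

-- ===== LEMMAS AND PROOFS =====

-- A's for-loop body over one neighbor list, at recursion depth ns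
def nrForA (G : List (Int × List Int)) (ns : Int) (nbrs : List Int) (seen : PySem.Set Int) : PySem.Set Int :=
  nbrs.foldl
    (fun s nbr =>
      if nbr ∈ s then s
      else noderadiusAuxA G nbr (ns - 1) (PySem.Set.add s nbr)) seen

theorem nrLoop_frame (G : List (Int × List Int)) (ns : Int) (nbrs : List Int)
    (stack : List (List Int × Int)) (seen : PySem.Set Int) :
    nrLoop G ((nbrs, ns) :: stack) seen = nrLoop G stack (nrForA G ns nbrs seen) := by
  match nbrs with
  | [] => simp [nrLoop, nrForA]
  | nbr :: more =>
      rw [nrLoop]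
      by_cases hmem : nbr ∈ seen
      · rw [if_pos hmem, nrLoop_frame G ns more stack seen]
        simp [nrForA, List.foldl_cons, hmem]
      · rw [if_neg hmem]
        have hfold : nrForA G ns (nbr :: more) seen
            = nrForA G ns more (noderadiusAuxA G nbr (ns - 1) (PySem.Set.add seen nbr)) := by
          simp [nrForA, List.foldl_cons, hmem]
        by_cases h2 : ns - 1 > 1
        · rw [dif_pos h2]
          rw [noderadiusAuxA] at hfold
          rw [dif_pos h2] at hfold
          split
          next hg =>
              rw [hg] at hfold
              dsimp only at hfold
              rw [nrLoop_frame G ns more stack (PySem.Set.add seen nbr), hfold]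
          next nb2 hg =>
              rw [hg] at hfold
              dsimp only at hfold
              rw [nrLoop_frame G (ns - 1) nb2 ((more, ns) :: stack) (PySem.Set.add seen nbr)]
              rw [nrLoop_frame G ns more stack (nrForA G (ns - 1) nb2 (PySem.Set.add seen nbr))]
              rw [hfold]
              rfl
        · rw [dif_neg h2]
          rw [noderadiusAuxA] at hfold
          rw [dif_neg h2] at hfold
          rw [nrLoop_frame G ns more stack (PySem.Set.add seen nbr), hfold]
termination_by (ns.toNat, nbrs.length)
decreasing_by
  all_goals first
    | exact Prod.Lex.right _ (by simp)
    | exact Prod.Lex.left _ _ (by omega)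

-- ===== VERDICT (by name: the statement is the Claim_ definition above) =====
theorem noderadius_spec : Claim_equal_noderadius := by
  intro G source_node num_steps nodes_seen _
  unfold Spec_noderadius noderadius noderadius_alt
  rw [noderadiusAuxA]
  by_cases h : num_steps > 1
  · rw [dif_pos h, if_pos h]
    cases (PySem.Dict.mk G).get? source_node with
    | none => rfl
    | some neighbors =>
        dsimp only
        rw [nrLoop_frame]
        simp [nrLoop, nrForA]
  · rw [dif_neg h, if_neg h]
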